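-- pv_equiv track=rewrite | github.com/LP-RG/subxpat | translator_to_forallZ3.py | generate_parameters_constraints_for_redundancy
-- ===== SOURCE A (Python) =====
-- from typing import Iterable, List, Callable, Any, Union, Tuple
--
-- def generate_and_join(function: Callable[..., Iterable[str]],
--                       ranges: List[Union[int, Iterable]],
--                       joiner: str,
--                       __internal: List[int] = []) -> str:
--     """
--     Args:
--         function (Callable[..., str]): it must take in one argument per element in ranges.\
--             If 'ranges' contains iterables then the function needs 2 arguments for that (index, value).
--     """
--
--     strings = []
--
--     if len(ranges) == 1:
--         # end case
--         if type(ranges[0]) is int: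
--             for i in range(ranges[0]):
--                 strings.extend(function(*__internal, i))
--         else:
--             for i, v in enumerate(ranges[0]):
--                 strings.extend(function(*__internal, i, v))
--
--     else:
--         # middle case
--         if type(ranges[0]) is int:
--             for i in range(ranges[0]):
--                 strings.append(generate_and_join(function, ranges[1:], joiner, __internal + [i]))
--         else:
--             for i, v in enumerate(ranges[0]):
--                 strings.append(generate_and_join(function, ranges[1:], joiner, __internal + [i, v]))
--
--     return joiner.join(strings)
--
-- def generate_parameters_constraints_for_redundancy(inputs_count: int,
--                                                    trees_per_output: int,
--                                                    outputs_count: int) -> str: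
--     def generator(_0, o_id, t_id, i_id):
--         p_s = f"p_o{o_id}_t{t_id}_i{i_id}_s"
--         p_l = f"p_o{o_id}_t{t_id}_i{i_id}_l"
--         # state and literal must not be both False
--         return [f"Implies({p_l}, {p_s})"]
--
--     strings = []
--     for o_id in range(outputs_count):
--         strings.append(generate_and_join(generator, [[o_id], trees_per_output, inputs_count], ", "))
--
--     return ",\n".join(strings)
-- ===== SOURCE B (Python) =====
-- def generate_parameters_constraints_for_redundancy(inputs_count: int,
--                                                    trees_per_output: int,
--                                                    outputs_count: int) -> str:
--     return ",\n".join(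
--         ", ".join(
--             ", ".join(
--                 f"Implies(p_o{o_id}_t{t_id}_i{i_id}_l, p_o{o_id}_t{t_id}_i{i_id}_s)"
--                 for i_id in range(inputs_count))
--             for t_id in range(trees_per_output))
--         for o_id in range(outputs_count))
-- ===== Notes on version B (the rewrite author's own statement) =====
-- stated objective: simpler
-- what changed: Replaces the generic recursive generate_and_join helper (heterogeneous ranges list, varargs accumulator) with one direct triply-nested comprehension whose joins mirror the same nesting.
import Mathlib
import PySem

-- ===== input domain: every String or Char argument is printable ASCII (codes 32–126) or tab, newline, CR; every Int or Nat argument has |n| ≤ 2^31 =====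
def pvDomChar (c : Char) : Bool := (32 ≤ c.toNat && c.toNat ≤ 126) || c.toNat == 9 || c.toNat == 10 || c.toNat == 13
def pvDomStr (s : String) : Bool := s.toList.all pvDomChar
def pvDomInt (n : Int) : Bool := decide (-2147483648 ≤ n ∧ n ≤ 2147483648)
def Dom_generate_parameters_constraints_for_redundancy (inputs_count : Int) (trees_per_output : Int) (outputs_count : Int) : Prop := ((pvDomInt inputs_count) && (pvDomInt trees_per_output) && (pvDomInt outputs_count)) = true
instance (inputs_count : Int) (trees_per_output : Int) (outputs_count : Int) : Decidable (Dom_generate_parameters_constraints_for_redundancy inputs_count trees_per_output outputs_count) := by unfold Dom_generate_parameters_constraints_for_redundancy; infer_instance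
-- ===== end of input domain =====

-- B replaces the generic recursive generate_and_join helper with one direct
-- triply-nested comprehension whose joins mirror the same nesting (objective: simpler).

-- ===== PORT A =====

-- ranges elements are Union[int, Iterable]; A only ever uses int and list-of-int
inductive PvRangeElem
  | int : Int → PvRangeElem
  | lst : List Int → PvRangeElem

-- the callback 'function': Python varargs (*__internal, i[, v]) ported as one Int list argument
-- generate_and_join, transliterated; the ranges list is never empty in A's calls
-- (Python would raise IndexError there; the [] branch returns joiner.join([]) = "")
def pv_generate_and_join (f : List Int → List String) (ranges : List PvRangeElem)
    (joiner : String) (internal : List Int) : String :=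
  match ranges with
  | [] => PySem.Str.join joiner []
  | [r] =>
    -- end case
    match r with
    | .int n =>
      PySem.Str.join joiner
        ((PySem.List.pyRange 0 n 1).foldl (fun acc i => acc ++ f (internal ++ [i])) [])
    | .lst vs =>
      PySem.Str.join joiner
        ((PySem.List.enumerate vs).foldl (fun acc iv => acc ++ f (internal ++ [iv.1, iv.2])) [])
  | r :: rest =>
    -- middle case
    match r with
    | .int n =>
      PySem.Str.join joiner
        ((PySem.List.pyRange 0 n 1).foldl
          (fun acc i => acc ++ [pv_generate_and_join f rest joiner (internal ++ [i])]) [])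
    | .lst vs =>
      PySem.Str.join joiner
        ((PySem.List.enumerate vs).foldl
          (fun acc iv => acc ++ [pv_generate_and_join f rest joiner (internal ++ [iv.1, iv.2])]) [])

-- the inner 'generator(_0, o_id, t_id, i_id)'; always called with exactly 4 args
def pv_generator (args : List Int) : List String :=
  match args with
  | [_z, o_id, t_id, i_id] =>
    let p_s := "p_o" ++ PySem.Int.toStr o_id ++ "_t" ++ PySem.Int.toStr t_id ++ "_i" ++ PySem.Int.toStr i_id ++ "_s"
    let p_l := "p_o" ++ PySem.Int.toStr o_id ++ "_t" ++ PySem.Int.toStr t_id ++ "_i" ++ PySem.Int.toStr i_id ++ "_l"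
    ["Implies(" ++ p_l ++ ", " ++ p_s ++ ")"]
  | _ => []  -- unreachable arity (Python would raise TypeError)

def generate_parameters_constraints_for_redundancy (inputs_count : Int) (trees_per_output : Int) (outputs_count : Int) : String :=
  PySem.Str.join ",\n"
    ((PySem.List.pyRange 0 outputs_count 1).foldl
      (fun acc o_id =>
        acc ++ [pv_generate_and_join pv_generator
                  [PvRangeElem.lst [o_id], PvRangeElem.int trees_per_output, PvRangeElem.int inputs_count]
                  ", " []]) [])

-- ===== PORT B =====

def pv_line (o_id t_id i_id : Int) : String :=
  "Implies(p_o" ++ PySem.Int.toStr o_id ++ "_t" ++ PySem.Int.toStr t_id ++ "_i" ++ PySem.Int.toStr i_id ++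
  "_l, p_o" ++ PySem.Int.toStr o_id ++ "_t" ++ PySem.Int.toStr t_id ++ "_i" ++ PySem.Int.toStr i_id ++ "_s)"

def generate_parameters_constraints_for_redundancy_alt (inputs_count : Int) (trees_per_output : Int) (outputs_count : Int) : String :=
  PySem.Str.join ",\n"
    ((PySem.List.pyRange 0 outputs_count 1).map (fun o_id =>
      PySem.Str.join ", "
        ((PySem.List.pyRange 0 trees_per_output 1).map (fun t_id =>
          PySem.Str.join ", "
            ((PySem.List.pyRange 0 inputs_count 1).map (fun i_id => pv_line o_id t_id i_id))))))

-- ===== PRECONDITION & SPEC =====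
def Spec_generate_parameters_constraints_for_redundancy (inputs_count : Int) (trees_per_output : Int) (outputs_count : Int) (out : String) : Prop := out = generate_parameters_constraints_for_redundancy_alt inputs_count trees_per_output outputs_count
instance (inputs_count : Int) (trees_per_output : Int) (outputs_count : Int) (out : String) : Decidable (Spec_generate_parameters_constraints_for_redundancy inputs_count trees_per_output outputs_count out) := by unfold Spec_generate_parameters_constraints_for_redundancy; infer_instance

-- ===== CLAIM (what is proved, stated in full; the proofs are below) =====
def Claim_equal_generate_parameters_constraints_for_redundancy : Prop := ∀ (inputs_count : Int) (trees_per_output : Int) (outputs_count : Int), Dom_generate_parameters_constraints_for_redundancy inputs_count trees_per_output outputs_count → Spec_generate_parameters_constraints_for_redundancy inputs_count trees_per_output outputs_count (generate_parameters_constraints_for_redundancy inputs_count trees_per_output outputs_count)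

-- ===== LEMMAS AND PROOFS =====

theorem pv_generator_line (o t i : Int) :
    pv_generator [0, o, t, i] = [pv_line o t i] := by
  simp only [pv_generator, pv_line, List.cons.injEq, and_true]
  rw [← String.toList_inj]
  simp [String.toList_append]

theorem pv_gaj_top (joiner : String) (o T n : Int) :
    pv_generate_and_join pv_generator
        [PvRangeElem.lst [o], PvRangeElem.int T, PvRangeElem.int n] joiner []
      = PySem.Str.join joiner ((PySem.List.pyRange 0 T 1).map (fun t =>
          PySem.Str.join joiner ((PySem.List.pyRange 0 n 1).map (fun i => pv_line o t i)))) := by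
  simp only [pv_generate_and_join, PySem.List.enumerate_cons, PySem.List.enumerate_nil,
    List.foldl_cons, List.foldl_nil, List.nil_append, List.cons_append,
    pv_generator_line, PySem.List.foldl_append_singleton_eq_map]
  simp [PySem.Str.join]

-- ===== VERDICT (by name: the statement is the Claim_ definition above) =====
theorem generate_parameters_constraints_for_redundancy_spec : Claim_equal_generate_parameters_constraints_for_redundancy := by
  intro inputs_count trees_per_output outputs_count _
  unfold Spec_generate_parameters_constraints_for_redundancy
  unfold generate_parameters_constraints_for_redundancy generate_parameters_constraints_for_redundancy_alt
  rw [PySem.List.foldl_append_singleton_eq_map]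
  simp [pv_gaj_top]
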